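-- pv_equiv track=rewrite | github.com/shunty-gh/AdventOfCode2022 | py/day06-with-timing.py | doit_full_scan
-- ===== SOURCE A (Python) =====
-- def check_packet_bool(pkt: str) -> bool:
--     for i in range(len(pkt)):
--         if (pkt[i] in pkt[i+1:]):
--             return False
--     return True
--
-- def doit_full_scan(input: str) -> tuple[int, int]:
--     """The original version - quick enough but with the potential for a lot of repeated scanning"""
--
--     part1, part2 = 0, 0
--     for i in range(len(input)):
--         if part1 == 0 and check_packet_bool(input[i:i+4]):
--             part1 = i + 4
--         if part2 == 0 and  check_packet_bool(input[i:i+14]):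
--             part2 = i + 14
--
--         if part1 > 0 and part2 > 0:
--             break
--     return (part1, part2)
-- ===== SOURCE B (Python) =====
-- def _first_clean_start(s: str, w: int) -> int:
--     """Smallest index i such that the window s[i:i+w] (the slice truncates at the
--     end of the string) contains no repeated character.  One last-seen sliding
--     pass: `start` is always the smallest i such that s[i:j+1] is duplicate-free;
--     once that run reaches length w we are done, and if the string ends first,
--     `start` itself is the first index with a clean (short) window."""
--     last = {}
--     start = 0
--     for j, c in enumerate(s):
--         p = last.get(c, -1)
--         if p >= start:
--             start = p + 1
--         last[c] = j
--         if j + 1 - start == w: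
--             return start
--     return start
--
-- def doit_full_scan(input: str) -> tuple[int, int]:
--     if not input:
--         return (0, 0)
--     return (_first_clean_start(input, 4) + 4, _first_clean_start(input, 14) + 14)
-- ===== Notes on version B (the rewrite author's own statement) =====
-- stated objective: faster
-- what changed: Replaces A's per-position rescan (for every start index, a quadratic all-distinct check of the window) with one last-seen/left-boundary sliding-window pass per marker width, so each character is examined O(1) times.
import Mathlib
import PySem

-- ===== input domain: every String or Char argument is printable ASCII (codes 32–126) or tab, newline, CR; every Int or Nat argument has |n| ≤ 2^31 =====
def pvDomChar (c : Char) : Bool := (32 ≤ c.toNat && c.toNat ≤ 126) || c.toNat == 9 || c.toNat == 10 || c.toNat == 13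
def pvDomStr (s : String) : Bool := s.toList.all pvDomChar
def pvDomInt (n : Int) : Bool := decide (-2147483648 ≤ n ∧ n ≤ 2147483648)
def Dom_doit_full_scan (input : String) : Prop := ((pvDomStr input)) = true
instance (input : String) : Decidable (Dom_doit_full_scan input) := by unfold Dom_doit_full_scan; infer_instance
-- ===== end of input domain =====

-- B replaces A's per-position quadratic window checks by one last-seen sliding-window
-- pass per width (same return value).

-- ===== PORT A =====
-- `for i in range(len(pkt)): if pkt[i] in pkt[i+1:] : return False` ; `return True`
-- (`pkt[i] in pkt[i+1:]` is substring membership of a single char = element membership, exact here)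
def cpbLoop (pkt : List Char) : List Int → Bool
  | [] => true
  | i :: rest =>
    if (PySem.List.slice pkt (some (i + 1)) none).contains (PySem.List.pyGetD pkt i ' ') then
      false
    else cpbLoop pkt rest

def check_packet_bool (pkt : List Char) : Bool :=
  cpbLoop pkt (PySem.List.pyRange 0 pkt.length 1)

-- the main loop of A, with its early `break` once both parts are set
def aLoop (l : List Char) : List Int → Int × Int → Int × Int
  | [], st => st
  | i :: rest, (p1, p2) =>
    let p1' := if p1 = 0 ∧ check_packet_bool (PySem.List.slice l (some i) (some (i + 4))) then i + 4 else p1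
    let p2' := if p2 = 0 ∧ check_packet_bool (PySem.List.slice l (some i) (some (i + 14))) then i + 14 else p2
    if p1' > 0 ∧ p2' > 0 then (p1', p2') else aLoop l rest (p1', p2')

def doit_full_scan (input : String) : Int × Int :=
  aLoop input.toList (PySem.List.pyRange 0 input.toList.length 1) (0, 0)

-- ===== PORT B =====
-- `for j, c in enumerate(s): p = last.get(c,-1); if p >= start: start = p+1; last[c] = j;`
-- `if j + 1 - start == w: return start` ; after the loop `return start`
def bLoop (w : Int) : List (Int × Char) → PySem.Dict Char Int → Int → Int
  | [], _, start => start
  | (j, c) :: rest, last, start =>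
    let p := last.getD c (-1)
    let start' := if p ≥ start then p + 1 else start
    let last' := last.insert c j
    if j + 1 - start' = w then start' else bLoop w rest last' start'

def first_clean_start (s : List Char) (w : Int) : Int :=
  bLoop w (PySem.List.enumerate s 0) PySem.Dict.empty 0

def doit_full_scan_alt (input : String) : Int × Int :=
  if input.toList = [] then (0, 0)
  else (first_clean_start input.toList 4 + 4, first_clean_start input.toList 14 + 14)

-- ===== PRECONDITION & SPEC =====
def Spec_doit_full_scan (input : String) (out : Int × Int) : Prop := out = doit_full_scan_alt input
instance (input : String) (out : Int × Int) : Decidable (Spec_doit_full_scan input out) := by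
  unfold Spec_doit_full_scan; infer_instance

-- ===== CLAIM (what is proved, stated in full; the proofs are below) =====
def Claim_equal_doit_full_scan : Prop :=
  ∀ (input : String), Dom_doit_full_scan input → Spec_doit_full_scan input (doit_full_scan input)

-- ===== LEMMAS AND PROOFS =====

-- the window of width w starting at i, and the segment [s, j)
def win (l : List Char) (w i : Nat) : List Char := (l.drop i).take w
def seg (l : List Char) (s j : Nat) : List Char := (l.drop s).take (j - s)
abbrev hitT (l : List Char) (w i : Nat) : Prop := (win l w i).Nodup

-- A's per-width result: (first i in scan order whose possibly-truncated width-w window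
-- is all-distinct) + w, or 0 when there is none (empty string)
def specA (l : List Char) (w : Nat) : Int :=
  if h : ∃ i, i < l.length ∧ hitT l w i then ((Nat.find h : Nat) : Int) + (w : Int) else 0

-- the first such i itself (what B's inner pass computes)
def specStart (l : List Char) (w : Nat) : Int :=
  if h : ∃ i, i < l.length ∧ hitT l w i then ((Nat.find h : Nat) : Int) else 0

lemma seg_self (l : List Char) (s : Nat) : seg l s s = [] := by
  unfold seg; simp

lemma seg_anti {l : List Char} {s s' j : Nat} (h : s ≤ s') :
    (seg l s j).Nodup → (seg l s' j).Nodup := by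
  intro hn
  have he : seg l s' j = (seg l s j).drop (s' - s) := by
    unfold seg
    rw [List.drop_take, List.drop_drop]
    congr 1
    · omega
    · congr 1; omega
  rw [he]
  exact hn.sublist (List.drop_sublist _ _)

lemma seg_nodup_shrink {l : List Char} {s j : Nat} :
    (seg l s (j + 1)).Nodup → (seg l s j).Nodup := by
  intro h
  have he : seg l s j = (seg l s (j + 1)).take (j - s) := by
    unfold seg
    rw [List.take_take]
    congr 1
    omega
  rw [he]
  exact h.sublist (List.take_sublist _ _)

lemma mem_seg {l : List Char} {c : Char} {s j : Nat} :
    c ∈ seg l s j ↔ ∃ k : Nat, s ≤ k ∧ k < j ∧ l[k]? = some c := by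
  unfold seg
  rw [List.mem_iff_getElem?]
  constructor
  · rintro ⟨t, ht⟩
    rw [List.getElem?_take] at ht
    split at ht
    · rw [List.getElem?_drop] at ht
      exact ⟨s + t, by omega, by omega, ht⟩
    · exact absurd ht (by simp)
  · rintro ⟨k, hsk, hkj, hk⟩
    refine ⟨k - s, ?_⟩
    rw [List.getElem?_take, if_pos (by omega), List.getElem?_drop,
      show s + (k - s) = k by omega]
    exact hk

lemma seg_succ {l : List Char} {s j : Nat} (hs : s ≤ j) (hj : j < l.length) :
    seg l s (j + 1) = seg l s j ++ [l[j]] := by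
  unfold seg
  rw [show j + 1 - s = (j - s) + 1 by omega, List.take_add_one]
  congr 1
  rw [List.getElem?_drop, show s + (j - s) = j by omega, List.getElem?_eq_getElem hj]
  rfl

lemma nodup_seg_succ {l : List Char} {s j : Nat} (hs : s ≤ j) (hj : j < l.length) :
    (seg l s (j + 1)).Nodup ↔ (seg l s j).Nodup ∧ l[j] ∉ seg l s j := by
  rw [seg_succ hs hj]
  simp [List.nodup_append]
  intro _
  constructor
  · intro h hm; exact h _ hm rfl
  · intro h a ha he; exact h (he ▸ ha)

lemma hitT_full {l : List Char} {w i : Nat} (_h : i + w ≤ l.length) :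
    hitT l w i ↔ (seg l i (i + w)).Nodup := by
  unfold hitT win seg
  rw [show i + w - i = w by omega]

lemma hitT_tail {l : List Char} {w i : Nat} (h : l.length ≤ i + w) :
    hitT l w i ↔ (seg l i l.length).Nodup := by
  unfold hitT win seg
  rw [List.take_of_length_le (by simp; omega), List.take_of_length_le (by simp)]

lemma win_take_seg {l : List Char} {w s : Nat} (h : s + w ≤ l.length) :
    win l w s = (seg l s l.length).take w := by
  unfold win seg
  rw [List.take_take]
  congr 1
  omega

lemma specStart_eq {l : List Char} {w : Nat} (m : Nat) (hm : m < l.length) (hh : hitT l w m)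
    (hmin : ∀ k, k < m → ¬ hitT l w k) :
    specStart l w = (m : Int) := by
  have h : ∃ i, i < l.length ∧ hitT l w i := ⟨m, hm, hh⟩
  rw [specStart, dif_pos h]
  congr 1
  rw [Nat.find_eq_iff]
  exact ⟨⟨hm, hh⟩, fun k hk hc => hmin k hk hc.2⟩

lemma nodup_of_len_le_one {α : Type} {xs : List α} (h : xs.length ≤ 1) : xs.Nodup := by
  match xs, h with
  | [], _ => exact List.nodup_nil
  | [a], _ => simp

lemma hit_exists {l : List Char} {w : Nat} (hw : 1 ≤ w) (hne : l ≠ []) :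
    ∃ i, i < l.length ∧ hitT l w i := by
  have hn : 0 < l.length := List.length_pos_iff.mpr hne
  refine ⟨l.length - 1, by omega, ?_⟩
  apply nodup_of_len_le_one
  unfold win
  simp only [List.length_take, List.length_drop]
  omega

lemma specA_nil (w : Nat) : specA [] w = 0 := by
  rw [specA, dif_neg]
  rintro ⟨i, hi, _⟩
  simp at hi

lemma specA_from_start {l : List Char} {w : Nat} (hw : 1 ≤ w) (hne : l ≠ []) :
    specA l w = specStart l w + (w : Int) := by
  have h := hit_exists hw hne
  rw [specA, dif_pos h, specStart, dif_pos h]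

-- ---- B-side invariants ----

def LastOcc (l : List Char) (j0 : Nat) (c : Char) (p : Int) : Prop :=
  (p = -1 ∧ ∀ k : Nat, k < j0 → l[k]? ≠ some c) ∨
  (∃ q : Nat, p = (q : Int) ∧ q < j0 ∧ l[q]? = some c ∧
    ∀ k : Nat, q < k → k < j0 → l[k]? ≠ some c)

def DictInv (l : List Char) (j0 : Nat) (d : PySem.Dict Char Int) : Prop :=
  ∀ c : Char, LastOcc l j0 c (d.getD c (-1))

def StartInv (l : List Char) (j0 st : Nat) : Prop :=
  st ≤ j0 ∧ (seg l st j0).Nodup ∧ ∀ s : Nat, s < st → ¬ (seg l s j0).Nodup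

def NF (l : List Char) (w j0 : Nat) : Prop := ∀ i : Nat, i + w ≤ j0 → ¬ hitT l w i

lemma mem_seg_iff_le {l : List Char} {j0 : Nat} {c : Char} {p : Int} {s : Nat}
    (hL : LastOcc l j0 c p) (_hs : s ≤ j0) : c ∈ seg l s j0 ↔ (s : Int) ≤ p := by
  rw [mem_seg]
  rcases hL with ⟨hp, hnone⟩ | ⟨q, hpq, hqlt, hq, hmax⟩
  · constructor
    · rintro ⟨k, _, hkj, hk⟩; exact absurd hk (hnone k hkj)
    · intro h; omega
  · subst hpq
    constructor
    · rintro ⟨k, hsk, hkj, hk⟩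
      by_contra hc
      have hqk : q < k := by omega
      exact hmax k hqk hkj hk
    · intro h; exact ⟨q, by omega, hqlt, hq⟩

lemma dict_step {l : List Char} {j0 : Nat} {d : PySem.Dict Char Int}
    (hj : j0 < l.length) (hD : DictInv l j0 d) :
    DictInv l (j0 + 1) (d.insert l[j0] (j0 : Int)) := by
  intro c
  rw [PySem.Dict.getD_insert]
  by_cases hc : c = l[j0]
  · rw [if_pos hc]
    exact Or.inr ⟨j0, rfl, by omega, by rw [List.getElem?_eq_getElem hj, hc],
      fun k h1 h2 => by omega⟩
  · rw [if_neg hc]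
    rcases hD c with ⟨hp, hnone⟩ | ⟨q, hpq, hqlt, hq, hmax⟩
    · refine Or.inl ⟨hp, fun k hk hke => ?_⟩
      rcases Nat.lt_or_ge k j0 with h | h
      · exact hnone k h hke
      · have : k = j0 := by omega
        subst this
        rw [List.getElem?_eq_getElem hj] at hke
        exact hc (by injection hke with h'; exact h'.symm)
    · refine Or.inr ⟨q, hpq, by omega, hq, fun k h1 h2 => ?_⟩
      rcases Nat.lt_or_ge k j0 with h | h
      · exact hmax k h1 h
      · have : k = j0 := by omega
        intro hke
        subst this
        rw [List.getElem?_eq_getElem hj] at hke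
        exact hc (by injection hke with h'; exact h'.symm)

lemma start_step {l : List Char} {j0 st : Nat} {p : Int}
    (hj : j0 < l.length) (hS : StartInv l j0 st) (hL : LastOcc l j0 l[j0] p) :
    ∃ st1 : Nat, ((st1 : Int) = if p ≥ (st : Int) then p + 1 else (st : Int)) ∧
      StartInv l (j0 + 1) st1 := by
  obtain ⟨hst, hnd, hmin⟩ := hS
  by_cases hp : p ≥ (st : Int)
  · have hp0 : 0 ≤ p := by omega
    rcases hL with ⟨hm1, _⟩ | ⟨q, hpq, hqlt, hq, hmax⟩
    · omega
    subst hpq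
    refine ⟨q + 1, by rw [if_pos hp]; push_cast; ring, ?_, ?_, ?_⟩
    · omega
    · rw [nodup_seg_succ (by omega) hj]
      refine ⟨seg_anti (by omega) hnd, ?_⟩
      rw [mem_seg_iff_le (Or.inr ⟨q, rfl, hqlt, hq, hmax⟩) (by omega)]
      push_cast; omega
    · intro s hs
      have hsj : s ≤ j0 := by omega
      rw [nodup_seg_succ hsj hj]
      rintro ⟨h1, h2⟩
      rcases Nat.lt_or_ge s st with h | h
      · exact hmin s h h1
      · exact h2 ((mem_seg_iff_le (Or.inr ⟨q, rfl, hqlt, hq, hmax⟩) hsj).mpr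
          (by omega))
  · refine ⟨st, by rw [if_neg hp], by omega, ?_, ?_⟩
    · rw [nodup_seg_succ hst hj]
      refine ⟨hnd, ?_⟩
      rw [mem_seg_iff_le hL hst]
      omega
    · intro s hs
      rw [nodup_seg_succ (by omega) hj]
      rintro ⟨h1, _⟩
      exact hmin s hs h1

lemma bLoop_spec (l : List Char) (w : Nat) (hw : 2 ≤ w) (hn : 1 ≤ l.length) :
    ∀ d j0 st : Nat, ∀ dic : PySem.Dict Char Int, l.length - j0 = d → j0 ≤ l.length →
    j0 < st + w →
    DictInv l j0 dic → StartInv l j0 st → NF l w j0 →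
    bLoop (w : Int) (PySem.List.enumerate (l.drop j0) (j0 : Int)) dic (st : Int)
      = specStart l w := by
  intro d
  induction d with
  | zero =>
    intro j0 st dic hd hj hwin hD hS hNF
    have hj0 : j0 = l.length := by omega
    subst hj0
    rw [List.drop_length, PySem.List.enumerate_nil]
    simp only [bLoop]
    have hstlt : st < l.length := by
      by_contra hc
      have hstn : st = l.length := by
        have := hS.1
        omega
      refine hS.2.2 (l.length - 1) (by omega) ?_
      have hseg : seg l (l.length - 1) l.length = [l[l.length - 1]'(by omega)] := by
        have := seg_succ (l := l) (s := l.length - 1) (j := l.length - 1)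
          le_rfl (by omega)
        rw [seg_self] at this
        rw [show l.length - 1 + 1 = l.length by omega] at this
        simpa using this
      rw [hseg]
      simp
    have htail : l.length < st + w := by
      by_contra hc
      refine hNF st (by omega) ?_
      unfold hitT
      rw [win_take_seg (by omega)]
      exact hS.2.1.sublist (List.take_sublist _ _)
    rw [specStart_eq st hstlt ((hitT_tail (by omega)).mpr hS.2.1)]
    intro k hk hh
    by_cases hkw : k + w ≤ l.length
    · exact hNF k hkw hh
    · rw [hitT_tail (by omega)] at hh
      exact hS.2.2 k hk hh
  | succ d ih =>
    intro j0 st dic hd hj hwin hD hS hNF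
    have hjlt : j0 < l.length := by omega
    rw [List.drop_eq_getElem_cons hjlt, PySem.List.enumerate_cons]
    simp only [bLoop]
    obtain ⟨st1, hst1, hS1⟩ := start_step hjlt hS (hD l[j0])
    rw [← hst1]
    have hstle : st ≤ st1 := by
      by_contra hc
      exact hS.2.2 st1 (by omega) (seg_nodup_shrink hS1.2.1)
    by_cases hbr : (j0 : Int) + 1 - (st1 : Int) = (w : Int)
    · rw [if_pos hbr]
      rw [specStart_eq st1 (by omega) ?_ ?_]
      · rw [hitT_full (by omega), show st1 + w = j0 + 1 by omega]
        exact hS1.2.1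
      · intro k hk
        exact hNF k (by omega)
    · rw [if_neg hbr]
      rw [show ((j0 : Int) + 1) = ((j0 + 1 : Nat) : Int) by push_cast; ring]
      refine ih (j0 + 1) st1 (dic.insert l[j0] (j0 : Int)) (by omega) (by omega)
        (by omega) (dict_step hjlt hD) hS1 ?_
      intro i hiw
      rcases Nat.lt_or_ge (i + w) (j0 + 1) with h | h
      · exact hNF i (by omega)
      · have hieq : i + w = j0 + 1 := by omega
        intro hh
        rw [hitT_full (by omega), hieq] at hh
        have hst1i : st1 ≤ i := by
          by_contra hc
          exact hS1.2.2 i (by omega) hh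
        omega

lemma B_eq_spec (l : List Char) (w : Nat) (hw : 2 ≤ w) (hn : 1 ≤ l.length) :
    first_clean_start l (w : Int) = specStart l w := by
  unfold first_clean_start
  have hmain := bLoop_spec l w hw hn l.length 0 0 PySem.Dict.empty
    (by omega) (by omega) (by omega)
    (fun c => by
      rw [PySem.Dict.getD_empty]
      exact Or.inl ⟨rfl, fun k hk => by omega⟩)
    ⟨le_rfl, by rw [seg_self]; exact List.nodup_nil, fun s hs => by omega⟩
    (fun i hiw => by omega)
  simpa using hmain

-- ---- A-side ----

lemma cpbLoop_all (pkt : List Char) (idxs : List Int) :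
    cpbLoop pkt idxs = idxs.all
      (fun i => !((PySem.List.slice pkt (some (i + 1)) none).contains (PySem.List.pyGetD pkt i ' '))) := by
  induction idxs with
  | nil => rfl
  | cons i rest ih =>
    rw [cpbLoop, List.all_cons, ← ih]
    by_cases h : (PySem.List.slice pkt (some (i + 1)) none).contains (PySem.List.pyGetD pkt i ' ') = true
    · rw [if_pos h, h]; rfl
    · rw [if_neg h, Bool.not_eq_true] at *
      rw [h]; rfl

lemma check_eq_nodup (pkt : List Char) : check_packet_bool pkt = decide pkt.Nodup := by
  unfold check_packet_bool
  rw [cpbLoop_all, PySem.List.pyRange_zero_natCast pkt.length, List.all_map, Bool.eq_iff_iff]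
  simp only [List.all_eq_true, List.mem_range, Function.comp, Bool.not_eq_true',
    decide_eq_true_eq]
  have hstep : ∀ (k : Nat) (hk : k < pkt.length),
      (((PySem.List.slice pkt (some ((k : Int) + 1)) none).contains
        (PySem.List.pyGetD pkt (k : Int) ' ') = false) ↔ pkt[k]'hk ∉ pkt.drop (k + 1)) := by
    intro k hk
    rw [show ((k : Int) + 1) = ((k + 1 : Nat) : Int) by push_cast; ring,
      PySem.List.slice_from_natCast, PySem.List.pyGetD_natCast, List.getD_eq_getElem _ _ hk]
    rw [← Bool.not_eq_true, List.contains_iff_mem]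
  constructor
  · intro hall
    rw [List.nodup_iff_getElem?_ne_getElem?]
    intro i j hij hjn hc
    have hin : i < pkt.length := by omega
    have h1 := (hstep i hin).mp (hall i hin)
    apply h1
    rw [List.mem_iff_getElem?]
    refine ⟨j - (i + 1), ?_⟩
    rw [List.getElem?_drop, show i + 1 + (j - (i + 1)) = j by omega, ← hc,
      List.getElem?_eq_getElem hin]
  · intro hnd k hk
    rw [hstep k hk]
    intro hmem
    rw [List.mem_iff_getElem?] at hmem
    obtain ⟨t, ht⟩ := hmem
    rw [List.getElem?_drop] at ht
    have htlen : k + 1 + t < pkt.length := by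
      by_contra hc
      rw [List.getElem?_eq_none (by omega)] at ht
      simp at ht
    rw [List.nodup_iff_getElem?_ne_getElem?] at hnd
    exact hnd k (k + 1 + t) (by omega) htlen
      (by rw [ht, List.getElem?_eq_getElem hk])

lemma find?_range_some {n : Nat} {q : Nat → Bool} (m : Nat) (hmn : m < n) (hq : q m = true)
    (hmin : ∀ k, k < m → ¬ q k = true) : (List.range n).find? q = some m := by
  induction n with
  | zero => omega
  | succ n ih =>
    rw [List.range_succ, List.find?_append]
    rcases Nat.lt_or_ge m n with h | h
    · rw [ih h, Option.some_or]
    · have hmn' : m = n := by omega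
      subst hmn'
      have : (List.range m).find? q = none := by
        rw [List.find?_eq_none]
        intro x hx
        exact hmin x (List.mem_range.mp hx)
      rw [this, Option.none_or, List.find?_cons_of_pos hq]

def fhit (l : List Char) (w : Int) (idxs : List Int) (p : Int) : Int :=
  if p ≠ 0 then p else
    match idxs.find? (fun i => check_packet_bool (PySem.List.slice l (some i) (some (i + w)))) with
    | some i => i + w
    | none => 0

lemma fhit_pos (l : List Char) (w : Int) (idxs : List Int) (p : Int) (h : p ≠ 0) :
    fhit l w idxs p = p := by
  unfold fhit
  rw [if_pos h]

lemma fhit_cons (l : List Char) (w : Int) (i : Int) (rest : List Int) (p : Int)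
    (hi : 0 ≤ i) (hw : 0 < w) (hp : 0 ≤ p) :
    fhit l w (i :: rest) p = fhit l w rest
      (if p = 0 ∧ check_packet_bool (PySem.List.slice l (some i) (some (i + w))) then i + w else p) := by
  by_cases hp0 : p = 0
  · subst hp0
    by_cases hc : check_packet_bool (PySem.List.slice l (some i) (some (i + w))) = true
    · rw [if_pos ⟨rfl, hc⟩, fhit_pos l w rest _ (by omega)]
      unfold fhit
      rw [if_neg (by omega), List.find?_cons_of_pos (p := fun i => check_packet_bool (PySem.List.slice l (some i) (some (i + w)))) hc]
    · rw [if_neg (by tauto)]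
      unfold fhit
      rw [List.find?_cons_of_neg (p := fun i => check_packet_bool (PySem.List.slice l (some i) (some (i + w)))) (by simpa using hc)]
  · rw [if_neg (by tauto), fhit_pos l w _ _ hp0, fhit_pos l w _ _ hp0]

lemma fhit_nil (l : List Char) (w p : Int) (hp : 0 ≤ p) : fhit l w [] p = p := by
  unfold fhit
  split_ifs with h
  · rfl
  · have : p = 0 := by omega
    subst this
    rfl

lemma aLoop_eq (l : List Char) : ∀ (idxs : List Int) (p1 p2 : Int), (∀ i ∈ idxs, 0 ≤ i) →
    0 ≤ p1 → 0 ≤ p2 → aLoop l idxs (p1, p2) = (fhit l 4 idxs p1, fhit l 14 idxs p2) := by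
  intro idxs
  induction idxs with
  | nil =>
    intro p1 p2 _ h1 h2
    rw [aLoop, fhit_nil l 4 p1 h1, fhit_nil l 14 p2 h2]
  | cons i rest ih =>
    intro p1 p2 hpos h1 h2
    have hi : 0 ≤ i := hpos i (by simp)
    simp only [aLoop]
    rw [fhit_cons l 4 i rest p1 hi (by norm_num) h1,
      fhit_cons l 14 i rest p2 hi (by norm_num) h2]
    set p1' := if p1 = 0 ∧ check_packet_bool (PySem.List.slice l (some i) (some (i + 4))) then i + 4 else p1 with hp1'
    set p2' := if p2 = 0 ∧ check_packet_bool (PySem.List.slice l (some i) (some (i + 14))) then i + 14 else p2 with hp2'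
    have hnn1 : 0 ≤ p1' := by rw [hp1']; split_ifs <;> omega
    have hnn2 : 0 ≤ p2' := by rw [hp2']; split_ifs <;> omega
    split_ifs with hb
    · rw [fhit_pos l 4 rest p1' (by omega), fhit_pos l 14 rest p2' (by omega)]
    · exact ih p1' p2' (fun x hx => hpos x (by simp [hx])) hnn1 hnn2

lemma fhit_spec (l : List Char) (w : Nat) (hw : 2 ≤ w) :
    fhit l (w : Int) (PySem.List.pyRange 0 (l.length : Int) 1) 0 = specA l w := by
  unfold fhit
  rw [if_neg (by omega), PySem.List.pyRange_zero_natCast, List.find?_map]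
  have hpred : ((fun i : Int => check_packet_bool (PySem.List.slice l (some i) (some (i + (w : Int))))) ∘
      (fun k : Nat => (k : Int))) = fun k : Nat => decide (hitT l w k) := by
    funext k
    simp only [Function.comp]
    rw [show ((k : Int) + (w : Int)) = ((k + w : Nat) : Int) by push_cast; ring,
      PySem.List.slice_natCast, check_eq_nodup]
    congr 1
    rw [show k + w - k = w by omega]
    rfl
  rw [hpred]
  by_cases h : ∃ i, i < l.length ∧ hitT l w i
  · have hfind := Nat.find_spec h
    rw [find?_range_some (Nat.find h) hfind.1 (by simpa using hfind.2)
      (fun k hk => by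
        simp only [decide_eq_true_eq]
        intro hh
        exact Nat.find_min h hk ⟨by omega, hh⟩)]
    rw [specA, dif_pos h]
    simp
  · have : (List.range l.length).find? (fun k => decide (hitT l w k)) = none := by
      rw [List.find?_eq_none]
      intro x hx
      simp only [decide_eq_true_eq]
      intro hh
      exact h ⟨x, List.mem_range.mp hx, hh⟩
    rw [this, specA, dif_neg h]
    simp

lemma A_eq_spec (l : List Char) :
    aLoop l (PySem.List.pyRange 0 l.length 1) (0, 0) = (specA l 4, specA l 14) := by
  rw [aLoop_eq l _ 0 0 ?_ le_rfl le_rfl]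
  · have h4 := fhit_spec l 4 (by norm_num)
    have h14 := fhit_spec l 14 (by norm_num)
    norm_num at h4 h14
    rw [h4, h14]
  · intro i hi
    rw [PySem.List.pyRange_zero_natCast] at hi
    obtain ⟨k, _, hk⟩ := List.mem_map.mp hi
    omega


-- ===== VERDICT (by name: the statement is the Claim_ definition above) =====
theorem doit_full_scan_spec : Claim_equal_doit_full_scan := by
  intro input _
  unfold Spec_doit_full_scan doit_full_scan doit_full_scan_alt
  rw [A_eq_spec]
  by_cases hne : input.toList = []
  · rw [if_pos hne, hne, specA_nil, specA_nil]
  · rw [if_neg hne]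
    have hn : 1 ≤ input.toList.length := by
      have := List.length_pos_iff.mpr hne
      omega
    have h4 := B_eq_spec input.toList 4 (by norm_num) hn
    have h14 := B_eq_spec input.toList 14 (by norm_num) hn
    norm_num at h4 h14
    rw [h4, h14, specA_from_start (by norm_num) hne, specA_from_start (by norm_num) hne]
    norm_num
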